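-- pv_equiv track=rewrite | github.com/brionydunbar/coding-challenges | CB_matching_characters.py | MatchingCharacters
-- ===== SOURCE A (Python) =====
-- def MatchingCharacters(strParam):
--   char_indices = {} # store first and last indices of each char
--   max_unique_chars = 0
--
--   # find all pairs of matching letters
--   # store first and last occurences
--   for i, char in enumerate(strParam):
--     if char not in char_indices:
--       char_indices[char] = [i, i] # first occurence
--     else:
--       char_indices[char][1] = i # last occurence
--
--   # calculate unique characters for each pair
--   for char, (first, last) in char_indices.items():
--     # only consider chars that appear more than once
--     if first != last:
--       # get substring between first and last occurence
--       substring = strParam[first + 1:last]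
--       # count unique chars in substring
--       unique_count = len(set(substring))
--       # update max unique chars found so far
--       max_unique_chars = max(max_unique_chars, unique_count)
--
--   return max_unique_chars
-- ===== SOURCE B (Python) =====
-- def MatchingCharacters(strParam):
--   occ = {}
--   for i, ch in enumerate(strParam):
--     if ch in occ:
--       occ[ch].append(i)
--     else:
--       occ[ch] = [i]
--   best = 0
--   vals = list(occ.values())
--   for idxs in vals:
--     if len(idxs) > 1:
--       f = idxs[0]
--       l = idxs[-1]
--       count = sum(1 for js in vals if any(f < j < l for j in js))
--       if count > best:
--         best = count
--   return best
-- ===== Notes on version B (the rewrite author's own statement) =====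
-- stated objective: alternative
-- what changed: B builds each character's full index list in one pass and, for each repeated character, counts the characters that have an occurrence strictly between its first and last index, instead of slicing the substring and building a set of it per character as A does.
import Mathlib
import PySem

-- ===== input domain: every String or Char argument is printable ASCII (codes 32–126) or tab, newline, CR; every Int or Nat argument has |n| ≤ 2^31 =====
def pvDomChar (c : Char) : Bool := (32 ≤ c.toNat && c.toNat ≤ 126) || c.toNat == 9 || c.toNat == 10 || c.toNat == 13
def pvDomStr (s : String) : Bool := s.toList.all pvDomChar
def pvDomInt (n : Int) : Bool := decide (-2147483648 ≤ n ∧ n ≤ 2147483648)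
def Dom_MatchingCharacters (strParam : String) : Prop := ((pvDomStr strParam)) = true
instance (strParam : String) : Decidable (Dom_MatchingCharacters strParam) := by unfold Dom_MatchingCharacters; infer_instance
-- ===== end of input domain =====

-- B replaces A's per-character substring slice + set with one pass collecting each character's
-- index list, then counts characters having an occurrence strictly between first and last index
-- (alternative algorithm, similar cost).

-- ===== PORT A =====
-- Python's two-element list [first, last] (index 1 mutated in place) is ported as the pair
-- (first, last); the `modify` default is never used since the key is present on that branch.
def MatchingCharacters (strParam : String) : Int :=
  let chars := strParam.toList
  let charIndices : PySem.Dict Char (Int × Int) :=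
    (PySem.List.enumerate chars 0).foldl
      (fun d p =>
        if d.contains p.2 = false then d.insert p.2 (p.1, p.1)
        else d.modify p.2 (p.1, p.1) (fun fl => (fl.1, p.1)))
      PySem.Dict.empty
  charIndices.items.foldl
    (fun maxUnique it =>
      if it.2.1 ≠ it.2.2 then
        max maxUnique
          ((PySem.Set.ofList (PySem.List.slice chars (some (it.2.1 + 1)) (some it.2.2))).length : Int)
      else maxUnique)
    0

-- ===== PORT B =====
def MatchingCharacters_alt (strParam : String) : Int :=
  let chars := strParam.toList
  let occ : PySem.Dict Char (List Int) :=
    (PySem.List.enumerate chars 0).foldl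
      (fun d p =>
        if d.contains p.2 then d.modify p.2 [] (fun js => js ++ [p.1])
        else d.insert p.2 [p.1])
      PySem.Dict.empty
  let vals := occ.values
  vals.foldl
    (fun best idxs =>
      if 1 < idxs.length then
        let f := PySem.List.pyGetD idxs 0 0
        let l := PySem.List.pyGetD idxs (-1) 0
        let count : Int :=
          (vals.countP (fun js => js.any (fun j => decide (f < j) && decide (j < l))) : Int)
        if best < count then count else best
      else best)
    0

-- ===== PRECONDITION & SPEC =====
def Spec_MatchingCharacters (strParam : String) (out : Int) : Prop := out = MatchingCharacters_alt strParam
instance (strParam : String) (out : Int) : Decidable (Spec_MatchingCharacters strParam out) := by unfold Spec_MatchingCharacters; infer_instance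

-- ===== CLAIM (what is proved, stated in full; the proofs are below) =====
def Claim_equal_MatchingCharacters : Prop := ∀ (strParam : String), Dom_MatchingCharacters strParam → Spec_MatchingCharacters strParam (MatchingCharacters strParam)

-- ===== LEMMAS AND PROOFS =====

def pvIdxs (cs : List Char) (c : Char) : List Int :=
  ((PySem.List.enumerate cs 0).filter (fun p => p.2 == c)).map (·.1)

def pvFoldA (cs : List Char) : PySem.Dict Char (Int × Int) :=
  (PySem.List.enumerate cs 0).foldl
    (fun d p =>
      if d.contains p.2 = false then d.insert p.2 (p.1, p.1)
      else d.modify p.2 (p.1, p.1) (fun fl => (fl.1, p.1)))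
    PySem.Dict.empty

def pvFoldB (cs : List Char) : PySem.Dict Char (List Int) :=
  (PySem.List.enumerate cs 0).foldl
    (fun d p =>
      if d.contains p.2 then d.modify p.2 [] (fun js => js ++ [p.1])
      else d.insert p.2 [p.1])
    PySem.Dict.empty

lemma pvFoldA_eq (cs : List Char) :
    pvFoldA cs = (PySem.List.enumerate cs 0).foldl
      (fun d p => d.modify p.2 (p.1, p.1) (fun fl => (fl.1, p.1))) PySem.Dict.empty := by
  unfold pvFoldA
  apply PySem.List.foldl_congr_mem
  intro d p _
  by_cases h : d.contains p.2
  · simp [h]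
  · simp only [Bool.not_eq_true] at h
    simp [h, PySem.Dict.modify, PySem.Dict.getD_of_not_contains _ _ h]

lemma pvFoldB_eq (cs : List Char) :
    pvFoldB cs = (PySem.List.enumerate cs 0).foldl
      (fun d p => d.modify p.2 [] (fun js => js ++ [p.1])) PySem.Dict.empty := by
  unfold pvFoldB
  apply PySem.List.foldl_congr_mem
  intro d p _
  by_cases h : d.contains p.2
  · simp [h]
  · simp only [Bool.not_eq_true] at h
    simp [h, PySem.Dict.modify, PySem.Dict.getD_of_not_contains _ _ h]

lemma mem_pvIdxs (cs : List Char) (c : Char) (j : Int) :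
    j ∈ pvIdxs cs c ↔ ∃ (n : Nat) (h : n < cs.length), j = (n : Int) ∧ cs[n] = c := by
  unfold pvIdxs
  simp only [List.mem_map, List.mem_filter, PySem.List.mem_enumerate_iff]
  constructor
  · rintro ⟨p, ⟨⟨n, h, rfl⟩, hc⟩, rfl⟩
    exact ⟨n, h, by simp, by simpa using hc⟩
  · rintro ⟨n, h, rfl, hc⟩
    exact ⟨((n : Int), c), ⟨⟨n, h, by simp [hc]⟩, by simp⟩, rfl⟩

lemma pvIdxs_eq_nil_iff (cs : List Char) (c : Char) : pvIdxs cs c = [] ↔ c ∉ cs := by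
  rw [List.eq_nil_iff_forall_not_mem]
  constructor
  · intro h hc
    obtain ⟨n, hn, hcn⟩ := List.mem_iff_getElem.mp hc
    exact h n (by rw [mem_pvIdxs]; exact ⟨n, hn, rfl, hcn⟩)
  · intro h j hj
    rw [mem_pvIdxs] at hj
    obtain ⟨n, hn, _, hcn⟩ := hj
    exact h (hcn ▸ List.getElem_mem hn)

lemma pairwise_pvIdxs (cs : List Char) (c : Char) : (pvIdxs cs c).Pairwise (· < ·) := by
  unfold pvIdxs
  apply List.Pairwise.map
  · intro a b h; exact h
  · exact (PySem.List.pairwise_lt_enumerate cs 0).filter _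

lemma getD_pvFoldB (cs : List Char) (c : Char) : (pvFoldB cs).getD c [] = pvIdxs cs c := by
  rw [pvFoldB_eq]
  have hmap : (PySem.List.enumerate cs 0).foldl
      (fun d p => d.modify p.2 [] (fun js => js ++ [p.1])) PySem.Dict.empty
      = ((PySem.List.enumerate cs 0).map Prod.swap).foldl
      (fun d p => d.modify p.1 [] (fun js => js ++ [p.2])) PySem.Dict.empty := by
    rw [List.foldl_map]; rfl
  rw [hmap, PySem.Dict.getD_foldl_modify_append]
  unfold pvIdxs
  simp [List.filter_map, List.map_map, Function.comp_def, Prod.swap]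

lemma keys_pvFoldB (cs : List Char) : (pvFoldB cs).keys = PySem.Set.ofList cs := by
  rw [pvFoldB_eq]
  have hmap : (PySem.List.enumerate cs 0).foldl
      (fun d p => d.modify p.2 [] (fun js => js ++ [p.1])) PySem.Dict.empty
      = ((PySem.List.enumerate cs 0).map Prod.swap).foldl
      (fun d p => d.modify p.1 [] (fun js => js ++ [p.2])) PySem.Dict.empty := by
    rw [List.foldl_map]; rfl
  rw [hmap]
  rw [show (fun (d : PySem.Dict Char (List Int)) (p : Char × Int) => d.modify p.1 [] fun js => js ++ [p.2])
      = (fun d p => d.modify ((fun (q : Char × Int) => q.1) p) [] ((fun (_ : PySem.Dict Char (List Int)) (q : Char × Int) (js : List Int) => js ++ [q.2]) d p)) from rfl,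
    PySem.Dict.keys_foldl_modify_key]
  simp [List.map_map, Function.comp_def, Prod.swap, PySem.List.map_snd_enumerate,
    PySem.Set.update_nil_left]

lemma pvIdxs_append_singleton (cs : List Char) (a c : Char) :
    pvIdxs (cs ++ [a]) c = pvIdxs cs c ++ (if a == c then [(cs.length : Int)] else []) := by
  unfold pvIdxs
  rw [PySem.List.enumerate_append]
  by_cases h : a == c <;> simp [h]

lemma pvFoldA_append (cs : List Char) (a : Char) :
    pvFoldA (cs ++ [a]) = (pvFoldA cs).modify a ((cs.length : Int), (cs.length : Int))
      (fun fl => (fl.1, (cs.length : Int))) := by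
  rw [pvFoldA_eq, pvFoldA_eq, PySem.List.enumerate_append, List.foldl_append]
  simp

lemma get?_pvFoldA (cs : List Char) (c : Char) :
    (pvFoldA cs).get? c =
      if pvIdxs cs c = [] then none
      else some ((pvIdxs cs c).headD 0, (pvIdxs cs c).getLastD 0) := by
  induction cs using List.reverseRecOn with
  | nil => simp [pvFoldA, pvIdxs, PySem.List.enumerate]
  | append_singleton cs a ih =>
    rw [pvFoldA_append, pvIdxs_append_singleton,
      PySem.Dict.modify, PySem.Dict.get?_insert, PySem.Dict.getD_eq_get?_getD]
    by_cases hca : c = a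
    · subst hca
      rw [ih]
      simp only [beq_self_eq_true, if_true]
      by_cases hnil : pvIdxs cs c = []
      · simp [hnil]
      · simp only [hnil, if_false]
        obtain ⟨x, t, he⟩ := List.exists_cons_of_ne_nil hnil
        rw [he, List.getLastD_concat]
        simp
    · have hba : (a == c) = false := by simp [Ne.symm hca]
      simp [hca, hba, ih]

lemma keys_pvFoldA (cs : List Char) : (pvFoldA cs).keys = PySem.Set.ofList cs := by
  induction cs using List.reverseRecOn with
  | nil => rfl
  | append_singleton cs a ih =>
    rw [pvFoldA_append, PySem.Dict.modify, PySem.Set.ofList_append_singleton,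
      PySem.Set.add_eq_ite]
    by_cases hmem : a ∈ cs
    · have hc : (pvFoldA cs).contains a = true := by
        rw [PySem.Dict.contains_eq_isSome_get?, get?_pvFoldA]
        simp [(pvIdxs_eq_nil_iff cs a).not_left.mpr (by simpa using hmem)]
      rw [PySem.Dict.keys_insert_of_contains _ _ hc, ih]
      simp [PySem.Set.mem_ofList, hmem]
    · have hc : (pvFoldA cs).contains a = false := by
        rw [PySem.Dict.contains_eq_isSome_get?, get?_pvFoldA]
        simp [(pvIdxs_eq_nil_iff cs a).mpr hmem]
      rw [PySem.Dict.keys_insert_of_not_contains _ _ hc, ih]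
      simp [PySem.Set.mem_ofList, hmem]

lemma mem_drop_take_iff {α : Type} (cs : List α) (a b : Nat) (x : α) :
    x ∈ (cs.drop a).take b ↔ ∃ (n : Nat), a ≤ n ∧ n < a + b ∧ ∃ (h : n < cs.length), cs[n] = x := by
  rw [List.mem_iff_getElem]
  constructor
  · rintro ⟨i, hi, hx⟩
    have hi' : i < b ∧ a + i < cs.length := by
      simp [List.length_take, List.length_drop] at hi; omega
    refine ⟨a + i, by omega, by omega, by omega, ?_⟩
    rw [List.getElem_take, List.getElem_drop] at hx
    exact hx
  · rintro ⟨n, h1, h2, h3, hx⟩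
    refine ⟨n - a, ?_, ?_⟩
    · simp [List.length_take, List.length_drop]; omega
    · rw [List.getElem_take, List.getElem_drop]
      have : a + (n - a) = n := by omega
      simp only [this]; exact hx

lemma set_len_eq_countP (u cs : List Char) (hsub : ∀ x ∈ u, x ∈ cs) :
    (PySem.Set.ofList u).length = (PySem.Set.ofList cs).countP (fun d => decide (d ∈ u)) := by
  rw [List.countP_eq_length_filter]
  have hperm : (PySem.Set.ofList u).Perm ((PySem.Set.ofList cs).filter (fun d => decide (d ∈ u))) := by
    rw [List.perm_ext_iff_of_nodup (PySem.Set.nodup_ofList u)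
      ((PySem.Set.nodup_ofList cs).filter _)]
    intro d
    simp only [List.mem_filter, PySem.Set.mem_ofList, decide_eq_true_eq]
    exact ⟨fun h => ⟨hsub d h, h⟩, fun h => h.2⟩
  exact hperm.length_eq

lemma any_eq_mem_slice (cs : List Char) (d : Char) (f l : Int) (hf : 0 ≤ f) (hfl : f < l) :
    ((pvIdxs cs d).any (fun j => decide (f < j) && decide (j < l)) = true) ↔
      d ∈ PySem.List.slice cs (some (f + 1)) (some l) := by
  rw [PySem.List.slice_toNat cs (by omega) (by omega), mem_drop_take_iff]
  rw [List.any_eq_true]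
  constructor
  · rintro ⟨j, hj, hcond⟩
    rw [mem_pvIdxs] at hj
    obtain ⟨n, hn, rfl, hcn⟩ := hj
    simp only [Bool.and_eq_true, decide_eq_true_eq] at hcond
    exact ⟨n, by omega, by omega, hn, hcn⟩
  · rintro ⟨n, h1, h2, h3, hx⟩
    refine ⟨(n : Int), (mem_pvIdxs cs d n).mpr ⟨n, h3, rfl, hx⟩, ?_⟩
    simp only [Bool.and_eq_true, decide_eq_true_eq]
    omega

lemma pyGetD_zero_nonempty (L : List Int) (x : Int) (t : List Int) (h : L = x :: t) :
    PySem.List.pyGetD L 0 0 = L.headD 0 := by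
  subst h; simp [PySem.List.pyGetD, PySem.List.pyGet?, PySem.List.pyIdx?]

lemma pyGetD_neg_one_nonempty (L : List Int) (h : L ≠ []) :
    PySem.List.pyGetD L (-1) 0 = L.getLastD 0 := by
  rw [PySem.List.pyGetD_neg_one L 0 h]
  obtain ⟨x, t, rfl⟩ := List.exists_cons_of_ne_nil h
  rw [List.getLast_eq_getLastD, List.getLastD_cons]

lemma headD_mem (L : List Int) (h : L ≠ []) : L.headD 0 ∈ L := by
  obtain ⟨x, t, rfl⟩ := List.exists_cons_of_ne_nil h; simp

lemma hd_lt_ls (L : List Int) (hp : L.Pairwise (· < ·)) (hlen : 1 < L.length) :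
    L.headD 0 < L.getLastD 0 := by
  have hne : L ≠ [] := by intro h; rw [h] at hlen; simp at hlen
  obtain ⟨x, t, rfl⟩ := List.exists_cons_of_ne_nil hne
  have ht : t ≠ [] := by rintro rfl; simp at hlen
  have hmem : (x :: t).getLastD 0 ∈ t := by
    rw [List.getLastD_cons]
    obtain ⟨y, u, rfl⟩ := List.exists_cons_of_ne_nil ht
    rw [List.getLastD_cons]
    exact List.getLastD_mem_cons
  exact (List.pairwise_cons.mp hp).1 _ hmem

lemma hd_ne_ls_iff (L : List Int) (hp : L.Pairwise (· < ·)) (hne : L ≠ []) :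
    (L.headD 0 ≠ L.getLastD 0) ↔ 1 < L.length := by
  constructor
  · intro h
    by_contra hlen
    obtain ⟨x, t, rfl⟩ := List.exists_cons_of_ne_nil hne
    have : t = [] := by
      cases t with
      | nil => rfl
      | cons y u => simp at hlen
    subst this
    simp at h
  · intro h; exact ne_of_lt (hd_lt_ls L hp h)

lemma hd_nonneg (cs : List Char) (c : Char) (h : pvIdxs cs c ≠ []) :
    0 ≤ (pvIdxs cs c).headD 0 := by
  have := (mem_pvIdxs cs c _).mp (headD_mem _ h)
  obtain ⟨n, _, he, _⟩ := this
  omega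

-- ===== VERDICT (by name: the statement is the Claim_ definition above) =====
theorem MatchingCharacters_spec : Claim_equal_MatchingCharacters := by
  intro s _
  unfold Spec_MatchingCharacters
  have hA : MatchingCharacters s = (pvFoldA s.toList).items.foldl
      (fun maxUnique it =>
        if it.2.1 ≠ it.2.2 then
          max maxUnique
            ((PySem.Set.ofList (PySem.List.slice s.toList (some (it.2.1 + 1)) (some it.2.2))).length : Int)
        else maxUnique) 0 := rfl
  have hB : MatchingCharacters_alt s = (pvFoldB s.toList).values.foldl
      (fun best idxs =>
        if 1 < idxs.length then
          let f := PySem.List.pyGetD idxs 0 0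
          let l := PySem.List.pyGetD idxs (-1) 0
          let count : Int :=
            (((pvFoldB s.toList).values).countP
              (fun js => js.any (fun j => decide (f < j) && decide (j < l))) : Int)
          if best < count then count else best
        else best) 0 := rfl
  set cs := s.toList with hcs
  have hnodupA : (pvFoldA cs).keys.Nodup := by
    rw [keys_pvFoldA]; exact PySem.Set.nodup_ofList cs
  have hnodupB : (pvFoldB cs).keys.Nodup := by
    rw [keys_pvFoldB]; exact PySem.Set.nodup_ofList cs
  have hitems : (pvFoldA cs).items
      = (PySem.Set.ofList cs).map (fun k => (k, (pvFoldA cs).getD k (0, 0))) := by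
    rw [PySem.Dict.items_eq_map_keys _ hnodupA (0, 0), keys_pvFoldA]
  have hvalues : (pvFoldB cs).values = (PySem.Set.ofList cs).map (fun k => pvIdxs cs k) := by
    rw [PySem.Dict.values_eq_map_keys _ hnodupB [], keys_pvFoldB]
    exact List.map_congr_left (fun k _ => getD_pvFoldB cs k)
  rw [hA, hB, hitems, hvalues, List.foldl_map, List.foldl_map]
  apply PySem.List.foldl_congr_mem
  intro acc k hk
  have hkcs : k ∈ cs := (PySem.Set.mem_ofList cs k).mp hk
  have hne : pvIdxs cs k ≠ [] := fun h => ((pvIdxs_eq_nil_iff cs k).mp h) hkcs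
  have hp := pairwise_pvIdxs cs k
  have hgetD : (pvFoldA cs).getD k (0, 0) = ((pvIdxs cs k).headD 0, (pvIdxs cs k).getLastD 0) := by
    rw [PySem.Dict.getD_eq_get?_getD, get?_pvFoldA]
    simp [hne]
  simp only [hgetD]
  by_cases hlen : 1 < (pvIdxs cs k).length
  · have hcond : (pvIdxs cs k).headD 0 ≠ (pvIdxs cs k).getLastD 0 :=
      (hd_ne_ls_iff _ hp hne).mpr hlen
    rw [if_pos hcond, if_pos hlen]
    obtain ⟨x, t, he⟩ := List.exists_cons_of_ne_nil hne
    rw [pyGetD_zero_nonempty _ x t he, pyGetD_neg_one_nonempty _ hne]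
    have hcount : ((PySem.Set.ofList cs).map (fun k => pvIdxs cs k)).countP
        (fun js => js.any (fun j =>
          decide ((pvIdxs cs k).headD 0 < j) && decide (j < (pvIdxs cs k).getLastD 0)))
        = (PySem.Set.ofList (PySem.List.slice cs (some ((pvIdxs cs k).headD 0 + 1))
            (some ((pvIdxs cs k).getLastD 0)))).length := by
      rw [List.countP_map, set_len_eq_countP _ cs
        (fun x hx => PySem.List.mem_of_mem_slice _ _ _ hx)]
      apply List.countP_congr
      intro d hd
      simp only [Function.comp]
      rw [Bool.eq_iff_iff, List.any_eq_true]
      rw [← List.any_eq_true, any_eq_mem_slice cs d _ _ (hd_nonneg cs k hne)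
        (hd_lt_ls _ hp hlen)]
      simp
    rw [hcount]
    have : ∀ (m v : Int), (if m < v then v else m) = max m v := by
      intro m v; rw [max_def]; split <;> split <;> omega
    rw [this]
  · have hcond : ¬ ((pvIdxs cs k).headD 0 ≠ (pvIdxs cs k).getLastD 0) := by
      rw [hd_ne_ls_iff _ hp hne]; exact hlen
    rw [if_neg hcond, if_neg hlen]
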